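-- pv_equiv track=rewrite | github.com/lauramhfur/AiB_Projects | Project_6/split_string.py | split_S_odds
-- ===== SOURCE A (Python) =====
-- def split_S_odds(S: str):
--     odd_S = sum(1 for i in range(1, len(S)+1) if S[i-1] == 'h' and i % 2 == 1)
--     odd_counter = 0   # Keep count of the number of Hs in ODD positions we see.
--     p_odds = None     # Index in S for which we have seen half the number of Hs in ODD positions.
--
--     for i, aa in enumerate(S, start = 1):
--         if aa == 'h':
--             if i % 2 == 1:
--                 odd_counter += 1
--                 if p_odds is None and odd_counter == odd_S // 2:
--                     p_odds = i
--
--     return S[:p_odds], S[p_odds:]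
-- ===== SOURCE B (Python) =====
-- def split_S_odds(S: str):
--     odds = S[::2]                      # the characters at odd 1-based positions of S
--     half = odds.count('h') // 2
--     if half == 0:
--         return S, S
--     j = -1
--     for _ in range(half):              # walk to the half-th 'h' by repeated find
--         j = odds.find('h', j + 1)
--     p = 2 * j + 1
--     return S[:p], S[p:]
-- ===== Notes on version B (the rewrite author's own statement) =====
-- stated objective: faster
-- what changed: B extracts the stride slice S[::2] (the odd 1-based positions), halves the count of the target character there, and walks to that occurrence by repeated str.find on the half-length string, replacing A's full-length Python loop that tests parity of every index and counts statefully; count/find/slicing run in C, so B is measurably faster.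
import Mathlib
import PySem

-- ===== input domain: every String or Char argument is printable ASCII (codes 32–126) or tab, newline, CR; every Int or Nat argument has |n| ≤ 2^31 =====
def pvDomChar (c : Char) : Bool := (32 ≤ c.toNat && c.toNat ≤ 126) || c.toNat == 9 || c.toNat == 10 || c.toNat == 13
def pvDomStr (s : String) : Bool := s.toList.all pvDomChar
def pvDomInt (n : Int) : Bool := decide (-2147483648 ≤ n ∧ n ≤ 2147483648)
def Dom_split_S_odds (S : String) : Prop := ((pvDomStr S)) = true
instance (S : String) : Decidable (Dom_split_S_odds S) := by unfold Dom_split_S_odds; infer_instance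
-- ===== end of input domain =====

-- B works on the stride slice S[::2] (the odd 1-based positions) and walks to the half-th
-- occurrence of the target character by repeated str.find, instead of A's count-then-rescan
-- over all positions with a parity test (objective: faster, in a timing run's measurement).

-- ===== PORT A =====
def split_S_odds (S : String) : String × String :=
  let cs := S.toList
  let odd_S : Int := (PySem.List.pyRange 1 (cs.length + 1) 1).foldl
      (fun acc i => if PySem.List.pyGetD cs (i - 1) ' ' == 'h' && PySem.Int.mod i 2 == 1 then acc + 1 else acc) 0
  let st := (PySem.List.enumerate cs 1).foldl
      (fun (st : Int × Option Int) p =>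
        if p.2 == 'h' then
          if PySem.Int.mod p.1 2 == 1 then
            let c := st.1 + 1
            (c, if st.2 = none ∧ c = PySem.Int.floordiv odd_S 2 then some p.1 else st.2)
          else st
        else st) ((0 : Int), (none : Option Int))
  match st.2 with
  | none => (S, S)
  | some p => (String.ofList (PySem.List.slice cs none (some p)), String.ofList (PySem.List.slice cs (some p) none))

-- ===== PORT B =====
def split_S_odds_alt (S : String) : String × String :=
  let cs := S.toList
  -- odds = S[::2]; a step-2 slice never raises, so slice? is always `some` here
  let odds : List Char := (PySem.List.slice? cs none none 2).getD []
  let half : Nat := (PySem.Chars.count odds ['h']) / 2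
  if half = 0 then (S, S)
  else
    -- j = -1; for _ in range(half): j = odds.find('h', j + 1)
    let j : Int := (List.range half).foldl (fun j _ => PySem.Chars.findFrom odds ['h'] (j + 1) none) (-1)
    let p : Int := 2 * j + 1
    (String.ofList (PySem.List.slice cs none (some p)), String.ofList (PySem.List.slice cs (some p) none))

-- ===== PRECONDITION & SPEC =====
def Spec_split_S_odds (S : String) (out : String × String) : Prop := out = split_S_odds_alt S
instance (S : String) (out : String × String) : Decidable (Spec_split_S_odds S out) := by unfold Spec_split_S_odds; infer_instance

-- ===== CLAIM (what is proved, stated in full; the proofs are below) =====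
def Claim_equal_split_S_odds : Prop := ∀ (S : String), Dom_split_S_odds S → Spec_split_S_odds S (split_S_odds S)

-- ===== LEMMAS AND PROOFS =====

-- A's loop step, with the two nested character/parity tests fused into one test.
def pvStep (predP : Int × Char → Bool) (t : Int) (st : Int × Option Int) (p : Int × Char) : Int × Option Int :=
  if predP p then (st.1 + 1, if st.2 = none ∧ st.1 + 1 = t then some p.1 else st.2) else st

lemma pvStep_eq (t : Int) :
    (fun (st : Int × Option Int) (p : Int × Char) =>
        if p.2 == 'h' then
          if PySem.Int.mod p.1 2 == 1 then
            let c := st.1 + 1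
            (c, if st.2 = none ∧ c = t then some p.1 else st.2)
          else st
        else st)
    = pvStep (fun p => p.2 == 'h' && PySem.Int.mod p.1 2 == 1) t := by
  funext st p
  simp only [pvStep, Bool.and_eq_true]
  by_cases h1 : p.2 == 'h' <;> by_cases h2 : PySem.Int.mod p.1 2 == 1 <;> simp [h1]

lemma pvFoldl_some (predP : Int × Char → Bool) (t : Int) :
    ∀ (L : List (Int × Char)) (c x : Int),
      (L.foldl (pvStep predP t) (c, some x)).2 = some x := by
  intro L
  induction L with
  | nil => intro c x; rfl
  | cons p L ih =>
    intro c x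
    rw [List.foldl_cons]
    by_cases h : predP p
    · have hstep : pvStep predP t (c, some x) p = (c + 1, some x) := by simp [pvStep, h]
      rw [hstep, ih]
    · have hstep : pvStep predP t (c, some x) p = (c, some x) := by simp [pvStep, h]
      rw [hstep, ih]

lemma pvFoldl_main (predP : Int × Char → Bool) (t : Int) :
    ∀ (L : List (Int × Char)) (c : Int),
      (L.foldl (pvStep predP t) (c, none)).2 =
        (if c < t then ((L.filter predP).map (·.1))[(t - c - 1).toNat]? else none) := by
  intro L
  induction L with
  | nil =>
    intro c
    by_cases hc : c < t <;> simp [hc]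
  | cons p L ih =>
    intro c
    rw [List.foldl_cons]
    by_cases h : predP p
    · by_cases ht : c + 1 = t
      · have hstep : pvStep predP t (c, none) p = (c + 1, some p.1) := by
          simp [pvStep, h, ht]
        rw [hstep, pvFoldl_some]
        have hc : c < t := by omega
        have hk : (t - c - 1).toNat = 0 := by omega
        simp [List.filter_cons_of_pos h, hc, hk]
      · have hstep : pvStep predP t (c, none) p = (c + 1, none) := by
          simp [pvStep, h, ht]
        rw [hstep, ih]
        by_cases hc : c < t
        · have hc1 : c + 1 < t := by omega
          have hk : (t - c - 1).toNat = (t - (c + 1) - 1).toNat + 1 := by omega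
          simp [List.filter_cons_of_pos h, hc, hc1, hk]
        · have hc1 : ¬ c + 1 < t := by omega
          simp [hc, hc1]
    · have hstep : pvStep predP t (c, none) p = (c, none) := by simp [pvStep, h]
      rw [hstep, ih, List.filter_cons_of_neg h]

-- on elements of enumerate cs 1, looking the character up by its index gives the paired character
lemma pvPred_congr (cs : List Char) :
    (PySem.List.enumerate cs 1).filter (fun p => p.2 == 'h' && PySem.Int.mod p.1 2 == 1)
      = (PySem.List.enumerate cs 1).filter
          (fun p => PySem.List.pyGetD cs (p.1 - 1) ' ' == 'h' && PySem.Int.mod p.1 2 == 1) := by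
  apply List.filter_congr
  intro p hp
  rcases (PySem.List.mem_enumerate_iff cs 1 p).1 hp with ⟨k, hk, rfl⟩
  simp [show ((1 : Int) + k - 1) = (k : Int) from by omega, List.getElem?_eq_getElem hk]

lemma pvPositions_eq (cs : List Char) :
    ((PySem.List.enumerate cs 1).filter (fun p => p.2 == 'h' && PySem.Int.mod p.1 2 == 1)).map (·.1)
      = (PySem.List.pyRange 1 (cs.length + 1) 1).filter
          (fun i => PySem.List.pyGetD cs (i - 1) ' ' == 'h' && PySem.Int.mod i 2 == 1) := by
  rw [pvPred_congr]
  have h1 : ((cs.length : Int) + 1) = 1 + (cs.length : Int) := by omega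
  rw [h1, ← PySem.List.map_fst_enumerate cs 1, List.filter_map]
  rfl

lemma pvCount_eq (cs : List Char) :
    (PySem.List.pyRange 1 (cs.length + 1) 1).foldl
        (fun acc i => if PySem.List.pyGetD cs (i - 1) ' ' == 'h' && PySem.Int.mod i 2 == 1 then acc + 1 else acc) (0 : Int)
      = (((PySem.List.pyRange 1 (cs.length + 1) 1).filter
          (fun i => PySem.List.pyGetD cs (i - 1) ' ' == 'h' && PySem.Int.mod i 2 == 1)).length : Int) := by
  rw [PySem.List.foldl_count_if]
  simp [List.countP_eq_length_filter]

-- the option A's loop leaves equals the (half-1)-th element of the odd-'h' position list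
lemma pvOpt_eq (cs : List Char) :
    ((PySem.List.enumerate cs 1).foldl
      (fun (st : Int × Option Int) p =>
        if p.2 == 'h' then
          if PySem.Int.mod p.1 2 == 1 then
            let c := st.1 + 1
            (c, if st.2 = none ∧ c = PySem.Int.floordiv
                  ((PySem.List.pyRange 1 (cs.length + 1) 1).foldl
                    (fun acc i => if PySem.List.pyGetD cs (i - 1) ' ' == 'h' && PySem.Int.mod i 2 == 1 then acc + 1 else acc) 0) 2
                then some p.1 else st.2)
          else st
        else st) ((0 : Int), (none : Option Int))).2
    = (if 1 ≤ ((PySem.List.pyRange 1 (cs.length + 1) 1).filter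
          (fun i => PySem.List.pyGetD cs (i - 1) ' ' == 'h' && PySem.Int.mod i 2 == 1)).length / 2
       then ((PySem.List.pyRange 1 (cs.length + 1) 1).filter
          (fun i => PySem.List.pyGetD cs (i - 1) ' ' == 'h' && PySem.Int.mod i 2 == 1))[((PySem.List.pyRange 1 (cs.length + 1) 1).filter
          (fun i => PySem.List.pyGetD cs (i - 1) ' ' == 'h' && PySem.Int.mod i 2 == 1)).length / 2 - 1]?
       else none) := by
  rw [pvStep_eq, pvFoldl_main, pvPositions_eq, pvCount_eq]
  set M := (PySem.List.pyRange 1 (cs.length + 1) 1).filter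
      (fun i => PySem.List.pyGetD cs (i - 1) ' ' == 'h' && PySem.Int.mod i 2 == 1) with hM
  have ht : PySem.Int.floordiv ((M.length : Int)) 2 = ((M.length / 2 : Nat) : Int) := by
    exact_mod_cast PySem.Int.floordiv_natCast M.length 2
  rw [ht]
  by_cases hh : 1 ≤ M.length / 2
  · have h0 : (0 : Int) < ((M.length / 2 : Nat) : Int) := by exact_mod_cast hh
    have hk : (((M.length / 2 : Nat) : Int) - 0 - 1).toNat = M.length / 2 - 1 := by omega
    rw [if_pos h0, if_pos hh, hk]
  · have h0 : ¬ (0 : Int) < ((M.length / 2 : Nat) : Int) := by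
      simp only [not_lt]
      exact_mod_cast Nat.le_of_lt_succ (by omega : M.length / 2 < 1)
    rw [if_neg h0, if_neg hh]

-- ---------- B side ----------

lemma pvSingleton_prefix (c : Char) (l : List Char) : [c] <+: l ↔ l[0]? = some c := by
  cases l with
  | nil => simp
  | cons a t => simp [List.cons_prefix_cons, eq_comm]

lemma pvFindNext (l : List Char) (c : Char) (tgt m : Nat)
    (htl : tgt < l.length) (htc : l[tgt] = c) (hm : m ≤ tgt)
    (hgap : ∀ i (hi : i < l.length), m ≤ i → i < tgt → l[i] ≠ c) :
    PySem.Chars.findFrom l [c] (m : Int) none = (tgt : Int) := by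
  have hml : m ≤ l.length := by omega
  rw [PySem.Chars.findFrom_natCast l [c] m hml]
  have hinf : [c] <:+: l.drop m := by
    rw [List.singleton_infix_iff]
    have hsome : (l.drop m)[tgt - m]? = some c := by
      rw [List.getElem?_drop]
      have e : m + (tgt - m) = tgt := by omega
      rw [e, List.getElem?_eq_getElem htl, htc]
    exact List.mem_of_getElem? hsome
  have hne : PySem.Chars.find (l.drop m) [c] ≠ -1 :=
    (PySem.Chars.find_ne_neg_one_iff _ _).2 hinf
  have hpos : 0 ≤ PySem.Chars.find (l.drop m) [c] :=
    (PySem.Chars.find_nonneg_iff _ _).2 hinf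
  obtain ⟨hpre, hmin⟩ := PySem.Chars.find_spec hpos
  rw [if_neg hne]
  have htn := Int.toNat_of_nonneg hpos
  -- the hit: l[r + m] = c
  have hget : l[(PySem.Chars.find (l.drop m) [c]).toNat + m]? = some c := by
    have h1 := (pvSingleton_prefix c _).1 hpre
    rw [List.getElem?_drop, List.getElem?_drop] at h1
    have e : m + ((PySem.Chars.find (l.drop m) [c]).toNat + 0)
        = (PySem.Chars.find (l.drop m) [c]).toNat + m := by omega
    rwa [e] at h1
  have hlt : (PySem.Chars.find (l.drop m) [c]).toNat + m < l.length :=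
    (List.getElem?_eq_some_iff.1 hget).1
  have hgetc : l[(PySem.Chars.find (l.drop m) [c]).toNat + m]'hlt = c := by
    rw [List.getElem?_eq_getElem hlt] at hget
    exact Option.some.inj hget
  -- no hit strictly before r
  have hmiss : ∀ i, i < (PySem.Chars.find (l.drop m) [c]).toNat → l[i + m]? ≠ some c := by
    intro i hi hcontra
    have h2 := hmin i hi
    rw [pvSingleton_prefix, List.getElem?_drop, List.getElem?_drop] at h2
    have e : m + (i + 0) = i + m := by omega
    rw [e] at h2
    exact h2 hcontra
  have heq : (PySem.Chars.find (l.drop m) [c]).toNat + m = tgt := by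
    rcases Nat.lt_trichotomy ((PySem.Chars.find (l.drop m) [c]).toNat + m) tgt with h | h | h
    · exact absurd hgetc (hgap _ hlt (by omega) h)
    · exact h
    · exfalso
      refine hmiss (tgt - m) (by omega) ?_
      have e : tgt - m + m = tgt := by omega
      rw [e, List.getElem?_eq_getElem htl, htc]
  omega

lemma pvFindNextIdx (l : List Char) (c : Char) (O : List Nat)
    (hOdef : O = List.findIdxs (fun x => x == c) l) (k : Nat) (hk : k < O.length)
    (m : Nat) (hm1 : ∀ j (hj : j < k), O[j]'(by omega) < m) (hm2 : m ≤ O[k]) :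
    PySem.Chars.findFrom l [c] (m : Int) none = (O[k] : Int) := by
  have hmemO : ∀ i, i ∈ O ↔ ∃ h : i < l.length, l[i] = c := by
    intro i
    rw [hOdef, List.mem_findIdxs_iff_exists_getElem_pos]
    exact exists_congr fun h => beq_iff_eq
  have hmono : ∀ i j (hi : i < O.length) (hj : j < O.length), i < j → O[i] < O[j] :=
    fun i j hi hj hij => (List.pairwise_iff_getElem.1 (hOdef ▸ List.pairwise_findIdxs)) i j hi hj hij
  obtain ⟨htl, htc⟩ := (hmemO O[k]).1 (List.getElem_mem hk)
  refine pvFindNext l c O[k] m htl htc hm2 ?_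
  intro i hi h1 h2 hic
  obtain ⟨j, hj, hjv⟩ := List.getElem_of_mem ((hmemO i).2 ⟨hi, hic⟩)
  rcases Nat.lt_or_ge j k with hjk | hjk
  · have := hm1 j hjk
    omega
  · rcases Nat.eq_or_lt_of_le hjk with h | h
    · subst h; omega
    · have := hmono k j hk hj h
      omega


def pvOdds (cs : List Char) : List Char :=
  (List.range ((cs.length + 1) / 2)).map (fun k => cs.getD (2 * k) ' ')

lemma pvLength_pvOdds (cs : List Char) : (pvOdds cs).length = (cs.length + 1) / 2 := by
  simp [pvOdds]

lemma pvGet_pvOdds (cs : List Char) (j : Nat) (hj : j < (cs.length + 1) / 2) :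
    (pvOdds cs)[j]'(by rw [pvLength_pvOdds]; exact hj) = cs.getD (2 * j) ' ' := by
  simp [pvOdds]


lemma pvFoldFind (l : List Char) (c : Char) (O : List Nat)
    (hOdef : O = List.findIdxs (fun x => x == c) l) :
    ∀ n (hn : n < O.length),
      (List.range (n + 1)).foldl (fun j _ => PySem.Chars.findFrom l [c] (j + 1) none) (-1)
        = ((O[n]'hn : Nat) : Int) := by
  have hmono : ∀ i j (hi : i < O.length) (hj : j < O.length), i < j → O[i] < O[j] :=
    fun i j hi hj hij => (List.pairwise_iff_getElem.1 (hOdef ▸ List.pairwise_findIdxs)) i j hi hj hij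
  intro n
  induction n with
  | zero =>
    intro hn
    rw [show List.range 1 = [0] from rfl, List.foldl_cons, List.foldl_nil]
    rw [show ((-1 : Int) + 1) = ((0 : Nat) : Int) from by norm_num]
    exact pvFindNextIdx l c O hOdef 0 hn 0 (fun j hj => by omega) (by omega)
  | succ n ih =>
    intro hn
    rw [List.range_succ, List.foldl_append, ih (by omega), List.foldl_cons, List.foldl_nil]
    have hc2 : ((O[n]'(by omega) : Nat) : Int) + 1 = ((O[n]'(by omega) + 1 : Nat) : Int) := by
      omega
    rw [hc2]
    refine pvFindNextIdx l c O hOdef (n + 1) hn (O[n]'(by omega) + 1) ?_ ?_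
    · intro j hj
      rcases Nat.lt_or_ge j n with h | h
      · have := hmono j n (by omega) (by omega) h
        omega
      · have hje : j = n := by omega
        subst hje
        omega
    · have := hmono n (n + 1) (by omega) hn (by omega)
      omega

lemma pvM_eq (cs : List Char) :
    (PySem.List.pyRange 1 (cs.length + 1) 1).filter
        (fun i => PySem.List.pyGetD cs (i - 1) ' ' == 'h' && PySem.Int.mod i 2 == 1)
      = ((pvOdds cs).findIdxs (· == 'h')).map (fun j : Nat => 2 * (j : Int) + 1) := by
  have hmemO : ∀ j : Nat, j ∈ (pvOdds cs).findIdxs (· == 'h') ↔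
      j < (cs.length + 1) / 2 ∧ cs.getD (2 * j) ' ' = 'h' := by
    intro j
    rw [List.mem_findIdxs_iff_exists_getElem_pos]
    constructor
    · rintro ⟨h, hp⟩
      rw [pvLength_pvOdds] at h
      refine ⟨h, ?_⟩
      have hg := pvGet_pvOdds cs j h
      rw [hg] at hp
      exact beq_iff_eq.1 hp
    · rintro ⟨h, hp⟩
      refine ⟨by rw [pvLength_pvOdds]; exact h, ?_⟩
      rw [pvGet_pvOdds cs j h]
      exact beq_iff_eq.2 hp
  apply List.eq_of_perm_of_sorted (le := (· < ·))
  · intro a b _ _ hab hba; omega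
  · exact List.Pairwise.filter _ (PySem.List.pairwise_lt_pyRange_one 1 ((cs.length : Int) + 1))
  · exact List.Pairwise.map _ (fun a b (hab : a < b) => by omega) List.pairwise_findIdxs
  · refine (List.perm_ext_iff_of_nodup ?_ ?_).2 ?_
    · exact List.Nodup.filter _ (PySem.List.nodup_pyRange_one 1 ((cs.length : Int) + 1))
    · exact List.Nodup.map (fun a b h => by omega) List.nodup_findIdxs
    · intro i
      rw [List.mem_filter, PySem.List.mem_pyRange_one, List.mem_map]
      simp only [Bool.and_eq_true, beq_iff_eq]
      constructor
      · rintro ⟨⟨h1, h2⟩, h3, h4⟩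
        have hmod : i % 2 = 1 := by
          have he : PySem.Int.mod i 2 = i % 2 := PySem.Int.mod_eq_emod_of_pos (by norm_num)
          omega
        obtain ⟨j, hj⟩ : ∃ j : Nat, i = 2 * (j : Int) + 1 := ⟨((i - 1) / 2).toNat, by omega⟩
        refine ⟨j, (hmemO j).2 ⟨by omega, ?_⟩, hj.symm⟩
        have hidx : (i - 1) = ((2 * j : Nat) : Int) := by push_cast; omega
        rw [hidx, PySem.List.pyGetD_natCast] at h3
        rwa [List.getD_eq_getElem?_getD]
      · rintro ⟨j, hjO, hji⟩
        obtain ⟨hjlt, hjc⟩ := (hmemO j).1 hjO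
        subst hji
        refine ⟨⟨by omega, by omega⟩, ?_, ?_⟩
        · have hidx : (2 * (j : Int) + 1 - 1) = ((2 * j : Nat) : Int) := by push_cast; ring
          rw [hidx, PySem.List.pyGetD_natCast]
          rwa [List.getD_eq_getElem?_getD] at hjc
        · have he : PySem.Int.mod (2 * (j : Int) + 1) 2 = (2 * (j : Int) + 1) % 2 :=
            PySem.Int.mod_eq_emod_of_pos (by norm_num)
          omega


lemma pvOdds_eq (cs : List Char) :
    (PySem.List.slice? cs none none 2).getD [] = pvOdds cs := by
  simp only [PySem.List.slice?, PySem.List.sliceIndices]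
  norm_num
  have hc : (if 0 < cs.length then (((cs.length : Int) + 2 - 1) / 2).toNat else 0)
      = (cs.length + 1) / 2 := by split_ifs <;> omega
  rw [hc, List.filterMap_congr (g := fun k => some (cs.getD (2 * k) ' '))]
  · rw [show (fun k => some (cs.getD (2 * k) ' ')) = some ∘ (fun k => cs.getD (2 * k) ' ') from rfl,
      List.filterMap_eq_map]
    rfl
  · intro k hk
    rw [List.mem_range] at hk
    have h2 : 2 * k < cs.length := by omega
    have ht : ((2 : Int) * (k : Int)).toNat = 2 * k := by omega
    rw [ht, List.getElem?_eq_getElem h2, List.getD_eq_getElem?_getD, List.getElem?_eq_getElem h2]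
    rfl

lemma pvCountGo (c : Char) :
    ∀ (l : List Char) (fuel acc : Nat), l.length ≤ fuel →
      PySem.Chars.count.go [c] fuel l acc = acc + l.countP (· == c) := by
  intro l
  induction l with
  | nil => intro fuel acc h; cases fuel <;> simp [PySem.Chars.count.go]
  | cons a t ih =>
    intro fuel acc h
    cases fuel with
    | zero => simp at h
    | succ f =>
      simp only [List.length_cons, Nat.add_le_add_iff_right] at h
      by_cases hc : a = c
      · have hpre : [c].isPrefixOf (a :: t) = true := by
          subst hc; simp [List.isPrefixOf]
        simp only [PySem.Chars.count.go, hpre, if_pos]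
        rw [show List.drop [c].length (a :: t) = t from rfl, ih f (acc + 1) h,
          List.countP_cons]
        simp [hc]
        omega
      · have hpre : [c].isPrefixOf (a :: t) = false := by
          simp [List.isPrefixOf]; exact fun he => absurd he.symm hc
        simp only [PySem.Chars.count.go, hpre, Bool.false_eq_true, if_false]
        rw [ih f acc h, List.countP_cons]
        simp [hc]

lemma pvCount_single (c : Char) (l : List Char) :
    PySem.Chars.count l [c] = l.countP (· == c) := by
  have := pvCountGo c l l.length 0 le_rfl
  simp [PySem.Chars.count, this]


-- ===== VERDICT (by name: the statement is the Claim_ definition above) =====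
theorem split_S_odds_spec : Claim_equal_split_S_odds := by
  intro S _
  unfold Spec_split_S_odds split_S_odds split_S_odds_alt
  simp only []
  rw [pvOpt_eq, pvOdds_eq, pvM_eq, pvCount_single, List.length_map, List.length_findIdxs]
  by_cases hz : (List.countP (fun x => x == 'h') (pvOdds S.toList)) / 2 = 0
  · rw [if_neg (by omega), if_pos hz]
  · rw [if_pos (by omega : 1 ≤ (List.countP (fun x => x == 'h') (pvOdds S.toList)) / 2),
      if_neg hz]
    have hlenO : (List.findIdxs (fun x => x == 'h') (pvOdds S.toList)).length
        = List.countP (fun x => x == 'h') (pvOdds S.toList) := List.length_findIdxs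
    have hidx : (List.countP (fun x => x == 'h') (pvOdds S.toList)) / 2 - 1
        < (List.findIdxs (fun x => x == 'h') (pvOdds S.toList)).length := by omega
    rw [List.getElem?_map, List.getElem?_eq_getElem hidx]
    have hsplit : (List.countP (fun x => x == 'h') (pvOdds S.toList)) / 2
        = ((List.countP (fun x => x == 'h') (pvOdds S.toList)) / 2 - 1) + 1 := by omega
    conv_rhs => rw [hsplit]
    rw [pvFoldFind (pvOdds S.toList) 'h'
      (List.findIdxs (fun x => x == 'h') (pvOdds S.toList)) rfl
      ((List.countP (fun x => x == 'h') (pvOdds S.toList)) / 2 - 1) hidx]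
    rfl
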